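-- pv_equiv track=rewrite | github.com/BoringBoredom/PCIutil | PCIutil.py | convert_affinities
-- ===== SOURCE A (Python) =====
-- def convert_affinities(value):
--     if value == "-":
--         return "-"
--     value = bin(value)
--     current_cpu = 0
--     reversed_binary_string = value.split("b")[1][::-1]
--     cpu_list = ""
--     for char in reversed_binary_string:
--         if char == "1":
--             cpu_list += str(current_cpu)
--             if current_cpu < len(reversed_binary_string) - 1:
--                 cpu_list += ", "
--         current_cpu += 1
--     return cpu_list
-- ===== SOURCE B (Python) =====
-- def convert_affinities(value):
--     if value == "-":
--         return "-"
--     v = abs(value)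
--     result = []
--     i = 0
--     while v:
--         if v & 1:
--             result.append(str(i))
--         v >>= 1
--         i += 1
--     return ", ".join(result)
-- ===== Notes on version B (the rewrite author's own statement) =====
-- stated objective: idiomatic
-- what changed: B drops the bin()-string construction, the split('b') and the string reversal entirely and instead shifts abs(value) bit by bit, collecting the indices of set bits in a list joined once with ', ', with no manual last-separator bookkeeping.
import Mathlib
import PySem

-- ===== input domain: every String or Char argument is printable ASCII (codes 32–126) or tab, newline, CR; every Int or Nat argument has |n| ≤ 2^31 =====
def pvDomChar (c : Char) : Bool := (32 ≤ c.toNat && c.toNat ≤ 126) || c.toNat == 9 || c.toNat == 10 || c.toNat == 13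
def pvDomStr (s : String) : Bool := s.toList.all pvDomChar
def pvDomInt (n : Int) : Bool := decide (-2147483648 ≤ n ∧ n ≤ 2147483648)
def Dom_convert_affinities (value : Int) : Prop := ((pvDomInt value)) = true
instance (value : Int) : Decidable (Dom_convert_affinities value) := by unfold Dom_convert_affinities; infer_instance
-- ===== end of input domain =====

-- B replaces A's bin()-string / reversal / manual-separator bookkeeping by a direct shift
-- loop over abs(value) collecting set-bit indices and joining them with ", " (idiomatic).

-- ===== PORT A =====
-- A's `value == "-"` guard can never hold for an int argument, so it is a no-op in this Int port.
def convert_affinities (value : Int) : String :=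
  let binstr : List Char := (PySem.Int.pyBin value).toList                        -- value = bin(value)
  let afterB : List Char :=
    (PySem.List.pyGet? ((PySem.Chars.split? binstr ['b']).getD []) 1).getD []     -- value.split("b")[1]
  let rbs : List Char := (PySem.List.slice? afterB none none (-1)).getD []        -- [::-1]
  let res :=
    rbs.foldl (fun (acc : List Char × Int) c =>                                   -- for char in …:
      if c = '1' then
        let cl := acc.1 ++ PySem.Int.toChars acc.2                                -- cpu_list += str(current_cpu)
        let cl := if acc.2 < (rbs.length : Int) - 1 then cl ++ [',', ' '] else cl -- if …: cpu_list += ", "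
        (cl, acc.2 + 1)
      else (acc.1, acc.2 + 1)) ([], 0)                                            -- current_cpu += 1
  String.ofList res.1

-- ===== PORT B =====
-- the `while v:` loop of Source B: str(i) for every set bit of v = abs(value), low bit first
def altGo (v : Nat) (i : Int) : List (List Char) :=
  if _h : v = 0 then []
  else (if v % 2 = 1 then [PySem.Int.toChars i] else []) ++ altGo (v / 2) (i + 1)
termination_by v
decreasing_by exact Nat.div_lt_self (Nat.pos_of_ne_zero _h) (by omega)

def convert_affinities_alt (value : Int) : String :=
  String.ofList (PySem.Chars.join [',', ' '] (altGo value.natAbs 0))              -- ", ".join(result)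

-- ===== PRECONDITION & SPEC =====
def Spec_convert_affinities (value : Int) (out : String) : Prop := out = convert_affinities_alt value
instance (value : Int) (out : String) : Decidable (Spec_convert_affinities value out) := by unfold Spec_convert_affinities; infer_instance

-- ===== CLAIM (what is proved, stated in full; the proofs are below) =====
def Claim_equal_convert_affinities : Prop := ∀ (value : Int), Dom_convert_affinities value → Spec_convert_affinities value (convert_affinities value)

-- ===== LEMMAS AND PROOFS =====

-- little-endian binary digit characters of n (bitsLE 0 = ['0'], matching bin(0) = "0b0")
def bitsLE (n : Nat) : List Char :=
  (n % 2).digitChar :: (if _h : n / 2 = 0 then [] else bitsLE (n / 2))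
termination_by n
decreasing_by exact Nat.div_lt_self (by omega) (by omega)

lemma toDigitsCore_two_eq (fuel : Nat) : ∀ (n : Nat) (ds : List Char), n < fuel →
    Nat.toDigitsCore 2 fuel n ds = (bitsLE n).reverse ++ ds := by
  induction fuel with
  | zero => intro n ds h; omega
  | succ fuel ih =>
    intro n ds _h
    rw [Nat.toDigitsCore, bitsLE]
    by_cases h2 : n / 2 = 0
    · simp [h2]
    · have hlt : n / 2 < fuel := by
        have := Nat.div_lt_self (Nat.pos_of_ne_zero (by omega : n ≠ 0)) (by omega : 1 < 2)
        omega
      simp only [h2, if_false, ih (n / 2) _ hlt]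
      simp

lemma toDigits_two_eq (n : Nat) : Nat.toDigits 2 n = (bitsLE n).reverse := by
  rw [Nat.toDigits, toDigitsCore_two_eq (n + 1) n [] (Nat.lt_succ_self n)]
  simp

lemma mem_bitsLE (n : Nat) : ∀ c ∈ bitsLE n, c = '0' ∨ c = '1' := by
  induction n using Nat.strong_induction_on with
  | _ n ih =>
    intro c hc
    rw [bitsLE] at hc
    rcases List.mem_cons.mp hc with h | h
    · subst h
      rcases Nat.mod_two_eq_zero_or_one n with h2 | h2 <;> simp [h2, Nat.digitChar]
    · by_cases h2 : n / 2 = 0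
      · simp [h2] at h
      · rw [dif_neg h2] at h
        exact ih (n / 2) (Nat.div_lt_self (Nat.pos_of_ne_zero (by omega)) (by omega)) c h

-- splitOn.go on a list not containing the separator just closes the current piece
lemma go_no_b (fuel : Nat) : ∀ (l cur : List Char) (acc : List (List Char)), 'b' ∉ l →
    PySem.Chars.splitOn.go ['b'] fuel l cur acc = acc.reverse ++ [cur.reverse ++ l] := by
  induction fuel with
  | zero => intro l cur acc _; rw [PySem.Chars.splitOn.go]; simp
  | succ fuel ih =>
    intro l cur acc hb
    cases l with
    | nil => rw [PySem.Chars.splitOn.go] <;> simp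
    | cons c rest =>
      rw [PySem.Chars.splitOn.go]
      have hc : c ≠ 'b' := fun h => hb (h ▸ List.mem_cons_self ..)
      have hpre : List.isPrefixOf ['b'] (c :: rest) = false := by
        simp [List.isPrefixOf]; intro h; exact absurd h.symm hc
      rw [hpre]
      simp only [Bool.false_eq_true, if_false]
      rw [ih rest (c :: cur) acc (fun h => hb (List.mem_cons_of_mem _ h))]
      simp

lemma go_after_b (fuel : Nat) (l cur : List Char) (acc : List (List Char)) (hb : 'b' ∉ l) :
    PySem.Chars.splitOn.go ['b'] (fuel + 1) ('b' :: l) cur acc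
      = acc.reverse ++ [cur.reverse, l] := by
  rw [PySem.Chars.splitOn.go]
  have hpre : List.isPrefixOf ['b'] ('b' :: l) = true := by simp [List.isPrefixOf]
  rw [hpre]
  simp only [if_true, List.length_cons, List.length_nil, List.drop_succ_cons, List.drop_zero]
  rw [go_no_b fuel l [] (cur.reverse :: acc) hb]
  simp

lemma split_bin_pos (l : List Char) (hb : 'b' ∉ l) :
    PySem.Chars.splitOn ('0' :: 'b' :: l) ['b'] = [['0'], l] := by
  rw [PySem.Chars.splitOn]
  simp only [List.length_cons]
  rw [show l.length + 1 + 1 + 1 = (l.length + 2) + 1 by omega, PySem.Chars.splitOn.go]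
  have hpre : List.isPrefixOf ['b'] ('0' :: 'b' :: l) = false := by simp [List.isPrefixOf]
  rw [hpre]
  simp only [Bool.false_eq_true, if_false]
  rw [show l.length + 2 = (l.length + 1) + 1 by omega, go_after_b _ l ['0'] [] hb]
  simp

lemma split_bin_neg (l : List Char) (hb : 'b' ∉ l) :
    PySem.Chars.splitOn ('-' :: '0' :: 'b' :: l) ['b'] = [['-', '0'], l] := by
  rw [PySem.Chars.splitOn]
  simp only [List.length_cons]
  rw [show l.length + 1 + 1 + 1 + 1 = (l.length + 3) + 1 by omega, PySem.Chars.splitOn.go]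
  have hpre : List.isPrefixOf ['b'] ('-' :: '0' :: 'b' :: l) = false := by simp [List.isPrefixOf]
  rw [hpre]
  simp only [Bool.false_eq_true, if_false]
  rw [show l.length + 3 = (l.length + 2) + 1 by omega, PySem.Chars.splitOn.go]
  have hpre2 : List.isPrefixOf ['b'] ('0' :: 'b' :: l) = false := by simp [List.isPrefixOf]
  rw [hpre2]
  simp only [Bool.false_eq_true, if_false]
  rw [show l.length + 2 = (l.length + 1) + 1 by omega, go_after_b _ l ['0', '-'] [] hb]
  simp

lemma altGo_ne_nil (v : Nat) (i : Int) (hv : v ≠ 0) : altGo v i ≠ [] := by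
  induction v using Nat.strong_induction_on generalizing i with
  | _ v ih =>
    rw [altGo, dif_neg hv]
    by_cases h2 : v % 2 = 1
    · simp [h2]
    · have hv2 : v / 2 ≠ 0 := by omega
      simp only [h2, if_false]
      simpa using ih (v / 2) (Nat.div_lt_self (Nat.pos_of_ne_zero hv) (by omega)) (i + 1) hv2

-- A's fold over the little-endian bits, started anywhere, produces the ", "-joined indices:
-- the top bit sits at index L - 1, so exactly the non-final '1's receive a separator.
lemma foldA_eq (L : Int) (n : Nat) : ∀ (i : Int) (acc : List Char), 0 < n →
    i + ((bitsLE n).length : Int) = L →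
    (bitsLE n).foldl (fun (acc : List Char × Int) c =>
      if c = '1' then
        let cl := acc.1 ++ PySem.Int.toChars acc.2
        let cl := if acc.2 < L - 1 then cl ++ [',', ' '] else cl
        (cl, acc.2 + 1)
      else (acc.1, acc.2 + 1)) (acc, i)
    = (acc ++ PySem.Chars.join [',', ' '] (altGo n i), L) := by
  induction n using Nat.strong_induction_on with
  | _ n ih =>
    intro i acc hn hL
    set f := (fun (acc : List Char × Int) (c : Char) =>
      if c = '1' then
        let cl := acc.1 ++ PySem.Int.toChars acc.2
        let cl := if acc.2 < L - 1 then cl ++ [',', ' '] else cl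
        (cl, acc.2 + 1)
      else (acc.1, acc.2 + 1)) with hf
    rw [bitsLE] at hL ⊢
    by_cases h2 : n / 2 = 0
    · have hn1 : n = 1 := by omega
      subst hn1
      simp only [dif_pos] at hL ⊢
      simp only [List.length_cons, List.length_nil] at hL
      have hni : ¬ (i < L - 1) := by omega
      have hstep : f (acc, i) ((1 : Nat) % 2).digitChar = (acc ++ PySem.Int.toChars i, i + 1) := by
        rw [hf]; simp [Nat.digitChar, hni]
      have halt : altGo 1 i = [PySem.Int.toChars i] := by
        rw [altGo]; simp [altGo]
      rw [List.foldl_cons, hstep, List.foldl_nil, halt, PySem.Chars.join_singleton,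
          show i + 1 = L by omega]
    · rw [dif_neg h2] at hL ⊢
      have hlen : (bitsLE (n / 2)).length ≥ 1 := by rw [bitsLE]; simp
      simp only [List.length_cons] at hL
      have hi : i < L - 1 := by push_cast at hL ⊢; omega
      have hrec := ih (n / 2) (Nat.div_lt_self hn (by omega)) (i + 1)
      rcases Nat.mod_two_eq_zero_or_one n with hm | hm
      · have hstep : f (acc, i) (n % 2).digitChar = (acc, i + 1) := by
          rw [hf]; simp [hm, Nat.digitChar]
        have halt : altGo n i = altGo (n / 2) (i + 1) := by
          rw [altGo, dif_neg (by omega : ¬ n = 0), if_neg (by omega)]; simp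
        rw [List.foldl_cons, hstep, hrec acc (by omega) (by push_cast at hL ⊢; omega), halt]
      · have hstep : f (acc, i) (n % 2).digitChar
            = (acc ++ (PySem.Int.toChars i ++ [',', ' ']), i + 1) := by
          rw [hf]; simp [hm, Nat.digitChar, hi]
        rw [List.foldl_cons, hstep,
            hrec (acc ++ (PySem.Int.toChars i ++ [',', ' '])) (by omega) (by push_cast at hL ⊢; omega)]
        have halt : altGo n i = PySem.Int.toChars i :: altGo (n / 2) (i + 1) := by
          rw [altGo, dif_neg (by omega : ¬ n = 0), if_pos hm]; simp
        rw [halt]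
        obtain ⟨y, ys, hy⟩ : ∃ y ys, altGo (n / 2) (i + 1) = y :: ys := by
          cases h : altGo (n / 2) (i + 1) with
          | nil => exact absurd h (altGo_ne_nil _ _ (by omega))
          | cons y ys => exact ⟨y, ys, rfl⟩
        rw [hy, PySem.Chars.join_cons_cons]
        simp

lemma convert_affinities_eq_alt (value : Int) :
    convert_affinities value = convert_affinities_alt value := by
  by_cases h0 : value = 0
  · subst h0
    simp only [convert_affinities, convert_affinities_alt]
    congr 1
    rw [show altGo (Int.natAbs 0) 0 = [] from by rw [altGo]; simp]
    decide
  · have hn : 0 < value.natAbs := Int.natAbs_pos.mpr h0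
    have hb' : 'b' ∉ Nat.toDigits 2 value.natAbs := by
      rw [toDigits_two_eq]
      intro h
      rcases mem_bitsLE _ _ (List.mem_reverse.mp h) with h1 | h1 <;> exact absurd h1 (by decide)
    have hrbs : (PySem.List.slice?
        ((PySem.List.pyGet?
          ((PySem.Chars.split? ((PySem.Int.pyBin value).toList) ['b']).getD []) 1).getD [])
        none none (-1)).getD [] = bitsLE value.natAbs := by
      rw [PySem.Int.toList_pyBin, PySem.Int.toBinChars0b]
      by_cases hneg : value < 0
      · rw [if_pos hneg]
        simp only [PySem.Chars.split?, List.isEmpty_cons, split_bin_neg _ hb']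
        rw [PySem.List.slice?_none_none_neg_one]
        simp [PySem.List.pyGet?, PySem.List.pyIdx?, toDigits_two_eq]
      · rw [if_neg hneg]
        have : value.toNat = value.natAbs := by omega
        rw [this]
        simp only [PySem.Chars.split?, List.isEmpty_cons, split_bin_pos _ hb']
        rw [PySem.List.slice?_none_none_neg_one]
        simp [PySem.List.pyGet?, PySem.List.pyIdx?, toDigits_two_eq]
    simp only [convert_affinities]
    rw [hrbs, foldA_eq ((bitsLE value.natAbs).length : Int) value.natAbs 0 [] hn (by simp)]
    simp [convert_affinities_alt]

-- ===== VERDICT (by name: the statement is the Claim_ definition above) =====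
theorem convert_affinities_spec : Claim_equal_convert_affinities := by
  intro value _
  unfold Spec_convert_affinities
  exact convert_affinities_eq_alt value
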